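-- pv_equiv track=rewrite | github.com/SBolsec/OOUP | 02/06.py | __column_name_to_index
-- ===== SOURCE A (Python) =====
-- def __column_name_to_index(column):
--   if len(column) == 0:
--     raise RuntimeError("Column does not exist")
--   index = 0
--   power = 1
--   for i in range(len(column)-1, -1, -1):
--     index += (ord(column[i]) - 65 + 1) * power
--     power *= 26
--   return index - 1
-- ===== SOURCE B (Python) =====
-- def __column_name_to_index(column):
--   if len(column) == 0:
--     raise RuntimeError("Column does not exist")
--   index = 0
--   for c in column:
--     index = index * 26 + (ord(c) - 65 + 1)
--   return index - 1
-- ===== Notes on version B (the rewrite author's own statement) =====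
-- stated objective: idiomatic
-- what changed: Replaces the reversed index loop with an explicit power accumulator by a left-to-right Horner scan over the characters (index = index*26 + digit), dropping the power variable and the index arithmetic.
import Mathlib
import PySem

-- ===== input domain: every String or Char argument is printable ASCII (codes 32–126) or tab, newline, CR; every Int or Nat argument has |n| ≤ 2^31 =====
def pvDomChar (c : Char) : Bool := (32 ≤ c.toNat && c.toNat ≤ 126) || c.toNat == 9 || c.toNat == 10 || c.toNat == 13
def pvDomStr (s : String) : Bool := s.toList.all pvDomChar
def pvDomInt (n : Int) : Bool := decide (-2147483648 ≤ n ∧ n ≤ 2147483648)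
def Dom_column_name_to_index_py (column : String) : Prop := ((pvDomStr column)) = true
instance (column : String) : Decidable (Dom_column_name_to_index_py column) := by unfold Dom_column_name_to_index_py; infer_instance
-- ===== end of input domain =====

-- B replaces A's reversed index loop with a power accumulator by a left-to-right Horner scan (idiomatic).

-- ===== PORT A =====
def column_name_to_index_py (column : String) : Int :=
  let st := (PySem.List.pyRange ((column.toList.length : Int) - 1) (-1) (-1)).foldl
    (fun (s : Int × Int) i =>
      (s.1 + ((((PySem.Str.pyGet? column i).getD ' ').toNat : Int) - 65 + 1) * s.2, s.2 * 26))
    ((0 : Int), (1 : Int))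
  st.1 - 1

-- ===== PORT B =====
def column_name_to_index_py_alt (column : String) : Int :=
  (column.toList.foldl (fun acc c => acc * 26 + ((c.toNat : Int) - 65 + 1)) 0) - 1

-- ===== PRECONDITION & SPEC =====
-- Pre_ excludes exactly the empty string, on which A raises RuntimeError.
def Pre_column_name_to_index_py (column : String) : Prop := column ≠ ""
instance (column : String) : Decidable (Pre_column_name_to_index_py column) := by unfold Pre_column_name_to_index_py; infer_instance
def pvWitness_column_name_to_index_py : String := "AB"
def Spec_column_name_to_index_py (column : String) (out : Int) : Prop := out = column_name_to_index_py_alt column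
instance (column : String) (out : Int) : Decidable (Spec_column_name_to_index_py column out) := by unfold Spec_column_name_to_index_py; infer_instance

-- ===== CLAIM (what is proved, stated in full; the proofs are below) =====
def Claim_equal_column_name_to_index_py : Prop := ∀ (column : String), Dom_column_name_to_index_py column → Pre_column_name_to_index_py column → Spec_column_name_to_index_py column (column_name_to_index_py column)

-- ===== LEMMAS AND PROOFS =====

-- Horner fold with an arbitrary accumulator splits off the accumulator.
theorem pv_horner_shift (l : List Char) (a : Int) :
    l.foldl (fun acc c => acc * 26 + ((c.toNat : Int) - 65 + 1)) a
      = a * 26 ^ l.length + l.foldl (fun acc c => acc * 26 + ((c.toNat : Int) - 65 + 1)) 0 := by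
  induction l generalizing a with
  | nil => simp
  | cons c t ih =>
    simp only [List.foldl_cons, List.length_cons]
    rw [ih (a * 26 + _), ih (0 * 26 + _)]
    ring

-- A's right-to-left accumulation (fold over the reversed list) equals Horner's value.
theorem pv_rev_fold (l : List Char) (a p : Int) :
    l.reverse.foldl
        (fun (s : Int × Int) c => (s.1 + ((c.toNat : Int) - 65 + 1) * s.2, s.2 * 26)) (a, p)
      = (a + p * l.foldl (fun acc c => acc * 26 + ((c.toNat : Int) - 65 + 1)) 0,
         p * 26 ^ l.length) := by
  induction l generalizing a p with
  | nil => simp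
  | cons c t ih =>
    simp only [List.reverse_cons, List.foldl_append, List.foldl_cons, List.foldl_nil,
      List.length_cons, ih]
    rw [pv_horner_shift t (0 * 26 + _), Prod.mk.injEq]
    constructor <;> ring

-- ===== VERDICT (by name: the statement is the Claim_ definition above) =====
theorem column_name_to_index_py_spec : Claim_equal_column_name_to_index_py := by
  intro column _ _
  show column_name_to_index_py column = column_name_to_index_py_alt column
  have hr : PySem.List.pyRange ((column.toList.length : Int) - 1) (-1) (-1)
      = (PySem.List.pyRange 0 (column.toList.length : Int) 1).reverse := by
    rw [PySem.List.pyRange_neg_one_eq_reverse]; norm_num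
  have h1 : ∀ (r : List Int),
      r.foldl (fun (s : Int × Int) i =>
          (s.1 + ((((PySem.Str.pyGet? column i).getD ' ').toNat : Int) - 65 + 1) * s.2, s.2 * 26))
        ((0 : Int), (1 : Int))
      = (r.map (fun i => (PySem.Str.pyGet? column i).getD ' ')).foldl
          (fun (s : Int × Int) c => (s.1 + ((c.toNat : Int) - 65 + 1) * s.2, s.2 * 26))
          ((0 : Int), (1 : Int)) :=
    fun r => by rw [List.foldl_map]
  have hm : (PySem.List.pyRange 0 (column.toList.length : Int) 1).map
      (fun i => (PySem.Str.pyGet? column i).getD ' ') = column.toList := by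
    have := PySem.List.map_pyGetD_pyRange_zero' column.toList ' '
    simpa [PySem.Str.pyGet?, PySem.List.pyGetD] using this
  simp only [column_name_to_index_py, column_name_to_index_py_alt]
  rw [hr, h1, List.map_reverse, hm, pv_rev_fold]
  ring
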